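-- pv_equiv track=rewrite | github.com/ixdat/ixdat | src/ixdat/readers/zilien.py | _get_series_splits
-- ===== SOURCE A (Python) =====
-- from itertools import groupby, zip_longest
--
-- def _get_series_splits(series_headers):
--     """Create series names and their index pairs in the whole read dataset.
--
--     Args:
--         series_headers (list): Series name headers (even empty).
--
--     Returns:
--         list, list: List of tuples with index pairs
--         and a list with non-empty series name headers.
--     """
--     series_split_indices = []
--     nonempty_headers = []
--
--     for index, series_header in enumerate(series_headers):
--         if series_header != "":
--             series_split_indices.append(index)
--             nonempty_headers.append(series_header)
--
--     # create split pairs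
--     # zip_longest to have the last pair with the index of the last
--     # series header to the end
--     series_split_indices = [
--         (begin, end)
--         for begin, end in zip_longest(series_split_indices, series_split_indices[1:])
--     ]
--
--     return series_split_indices, nonempty_headers
-- ===== SOURCE B (Python) =====
-- def _get_series_splits(series_headers):
--     """Build the result back-to-front: traverse the headers right-to-left,
--     and read each pair's end index off the head (= most recently emitted,
--     i.e. next-to-the-right) of the already-built result instead of keeping
--     any index list or begin/end state."""
--     rev_pairs = []
--     rev_names = []
--     for index, header in reversed(list(enumerate(series_headers))):
--         if header != "":
--             end = rev_pairs[-1][0] if rev_pairs else None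
--             rev_pairs.append((index, end))
--             rev_names.append(header)
--     rev_pairs.reverse()
--     rev_names.reverse()
--     return rev_pairs, rev_names
-- ===== Notes on version B (the rewrite author's own statement) =====
-- stated objective: alternative
-- what changed: B traverses the headers right-to-left and builds both outputs back-to-front, reading each pair's end index off the most recently emitted pair of the result under construction, instead of A's forward pass collecting an index list that is then zipped with its own tail via zip_longest.
import Mathlib
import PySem

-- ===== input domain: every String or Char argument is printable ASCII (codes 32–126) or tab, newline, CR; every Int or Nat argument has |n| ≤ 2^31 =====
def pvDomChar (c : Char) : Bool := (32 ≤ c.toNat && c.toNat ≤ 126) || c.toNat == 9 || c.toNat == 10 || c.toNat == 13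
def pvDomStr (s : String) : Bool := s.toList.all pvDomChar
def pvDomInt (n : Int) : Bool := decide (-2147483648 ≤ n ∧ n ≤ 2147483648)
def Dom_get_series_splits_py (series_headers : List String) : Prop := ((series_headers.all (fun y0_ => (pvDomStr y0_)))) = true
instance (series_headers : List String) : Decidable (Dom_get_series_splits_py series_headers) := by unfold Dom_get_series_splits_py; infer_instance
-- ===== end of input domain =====

-- B builds the result back-to-front from a right-to-left traversal, reading each
-- pair's end off the already-built result, instead of A's forward index list +
-- zip_longest (objective: alternative).
-- ===== PORT A =====
-- the for-loop over enumerate(series_headers), collecting indices and nonempty headers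
def pvALoop : Int → List String → List Int × List String
  | _, [] => ([], [])
  | i, h :: t =>
    let r := pvALoop (i + 1) t
    if h ≠ "" then (i :: r.1, h :: r.2) else r

-- zip_longest(l, l[1:]) pairing
def pvZL : List Int → List (Int × Option Int)
  | [] => []
  | [x] => [(x, none)]
  | x :: y :: rest => (x, some y) :: pvZL (y :: rest)

def get_series_splits_py (series_headers : List String) : (List (Int × Option Int)) × List String :=
  let r := pvALoop 0 series_headers
  (pvZL r.1, r.2)

-- ===== PORT B =====
-- loop body: 'if header != "": end = rev_pairs[-1][0] if rev_pairs else None; append; append'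
-- (rev_pairs[-1] on a nonempty list is exactly its last element: getLast?)
def pvBStep (st : List (Int × Option Int) × List String) (ih : Int × String) :
    List (Int × Option Int) × List String :=
  if ih.2 ≠ "" then
    let endv : Option Int := match st.1.getLast? with
      | none => none
      | some pr => some pr.1
    (st.1 ++ [(ih.1, endv)], st.2 ++ [ih.2])
  else st

def get_series_splits_py_alt (series_headers : List String) : (List (Int × Option Int)) × List String :=
  let st := ((PySem.List.enumerate series_headers 0).reverse).foldl pvBStep ([], [])
  (st.1.reverse, st.2.reverse)

-- ===== PRECONDITION & SPEC =====
def Spec_get_series_splits_py (series_headers : List String) (out : (List (Int × Option Int)) × List String) : Prop := out = get_series_splits_py_alt series_headers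
instance (series_headers : List String) (out : (List (Int × Option Int)) × List String) : Decidable (Spec_get_series_splits_py series_headers out) := by unfold Spec_get_series_splits_py; infer_instance

-- ===== CLAIM (what is proved, stated in full; the proofs are below) =====
def Claim_equal_get_series_splits_py : Prop := ∀ (series_headers : List String), Dom_get_series_splits_py series_headers → Spec_get_series_splits_py series_headers (get_series_splits_py series_headers)

-- ===== LEMMAS AND PROOFS =====
-- pvZL with an explicit closing value for the last pair
def pvZLc : List Int → Option Int → List (Int × Option Int)
  | [], _ => []
  | [x], nxt => [(x, nxt)]
  | x :: y :: rest, nxt => (x, some y) :: pvZLc (y :: rest) nxt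

theorem pvZL_eq_pvZLc (l : List Int) : pvZL l = pvZLc l none := by
  induction l with
  | nil => rfl
  | cons x r ih =>
    cases r with
    | nil => rfl
    | cons y s => simp [pvZL, pvZLc] at ih ⊢; exact ih

theorem pvZLc_head (y : Int) (r : List Int) (nxt : Option Int) :
    (pvZLc (y :: r) nxt).head?.map Prod.fst = some y := by
  cases r <;> simp [pvZLc]

-- last-begin of the accumulated reversed pairs
def pvLB (p : List (Int × Option Int)) : Option Int :=
  match p.getLast? with
  | none => none
  | some pr => some pr.1

theorem pvB_invariant (t : List String) : ∀ (i : Int) (p : List (Int × Option Int)) (m : List String),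
    ((PySem.List.enumerate t i).reverse).foldl pvBStep (p, m)
      = (p ++ (pvZLc (pvALoop i t).1 (pvLB p)).reverse, m ++ (pvALoop i t).2.reverse) := by
  induction t with
  | nil => intro i p m; simp [PySem.List.enumerate_nil, pvALoop, pvZLc]
  | cons h t ih =>
    intro i p m
    rw [PySem.List.enumerate_cons]
    simp only [List.reverse_cons, List.foldl_append, List.foldl_cons, List.foldl_nil, ih]
    by_cases hh : h = ""
    · simp [pvBStep, hh, pvALoop]
    · have hcond : (h ≠ "") = True := by simp [hh]
      simp only [pvBStep, hcond, if_pos]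
      simp only [pvALoop, if_pos (by exact hh : h ≠ "")]
      cases hl : (pvALoop (i + 1) t).1 with
      | nil =>
        simp [pvZLc, pvLB]
      | cons y r =>
        have hend : (match (p ++ (pvZLc (y :: r) (pvLB p)).reverse).getLast? with
            | none => (none : Option Int) | some pr => some pr.1) = some y := by
          have hne : (pvZLc (y :: r) (pvLB p)).reverse ≠ [] := by cases r <;> simp [pvZLc]
          rw [List.getLast?_append_of_ne_nil _ hne, List.getLast?_reverse]
          have := pvZLc_head y r (pvLB p)
          cases hh' : (pvZLc (y :: r) (pvLB p)).head? with
          | none => simp [hh'] at this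
          | some pr =>
            rw [hh'] at this
            simp at this
            simp [this]
        simp only [hend]
        simp [pvZLc, List.append_assoc]

-- ===== VERDICT (by name: the statement is the Claim_ definition above) =====
theorem get_series_splits_py_spec : Claim_equal_get_series_splits_py := by
  intro hs _
  show get_series_splits_py hs = get_series_splits_py_alt hs
  simp only [get_series_splits_py, get_series_splits_py_alt, pvB_invariant]
  simp [pvLB, pvZL_eq_pvZLc]
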